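-- pv_equiv track=rewrite | github.com/shatianming5/detection_kdd | scripts/eval_mmdet3_multiseed.py | _infer_metric_type
-- ===== SOURCE A (Python) =====
-- def _infer_metric_type(metrics: dict) -> str:
--     if any(k.startswith("coco/") for k in metrics.keys()):
--         return "coco"
--     if any(k.startswith("lvis/") for k in metrics.keys()):
--         return "lvis"
--     if any(k.startswith("crowd_human/") for k in metrics.keys()):
--         return "crowdhuman"
--     return "unknown"
-- ===== SOURCE B (Python) =====
-- def _infer_metric_type(metrics: dict) -> str:
--     prefixes = set()
--     for k in metrics.keys():
--         head, sep, _ = k.partition("/")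
--         if sep:
--             prefixes.add(head)
--     if "coco" in prefixes:
--         return "coco"
--     if "lvis" in prefixes:
--         return "lvis"
--     if "crowd_human" in prefixes:
--         return "crowdhuman"
--     return "unknown"
-- ===== Notes on version B (the rewrite author's own statement) =====
-- stated objective: faster
-- what changed: Replaces the three repeated any()-scans over the keys (each re-testing every key with startswith) by a single pass that builds a set of top-level '/'-prefixes, followed by three set lookups in the same priority order.
import Mathlib
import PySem

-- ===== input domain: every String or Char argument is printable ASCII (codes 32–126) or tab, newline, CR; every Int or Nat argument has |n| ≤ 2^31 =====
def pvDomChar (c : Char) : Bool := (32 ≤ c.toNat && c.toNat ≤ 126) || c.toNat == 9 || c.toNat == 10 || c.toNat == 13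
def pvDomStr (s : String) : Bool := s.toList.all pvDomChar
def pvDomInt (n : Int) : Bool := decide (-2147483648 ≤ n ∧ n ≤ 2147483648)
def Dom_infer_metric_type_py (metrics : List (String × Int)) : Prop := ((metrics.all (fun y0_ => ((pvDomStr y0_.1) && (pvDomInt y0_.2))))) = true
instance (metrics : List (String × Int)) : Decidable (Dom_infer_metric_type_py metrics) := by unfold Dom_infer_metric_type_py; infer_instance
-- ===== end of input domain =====

-- B builds a set of top-level '/'-prefixes in one pass, then checks it in the same priority order as A's three any()-scans.


-- ===== PORT A =====
def infer_metric_type_py (metrics : List (String × Int)) : String :=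
  if metrics.any (fun kv => PySem.Str.startswith kv.1 "coco/") then "coco"
  else if metrics.any (fun kv => PySem.Str.startswith kv.1 "lvis/") then "lvis"
  else if metrics.any (fun kv => PySem.Str.startswith kv.1 "crowd_human/") then "crowdhuman"
  else "unknown"

-- ===== PORT B =====
-- k.partition("/") ported by hand (PySem has no partition): head = chars before the
-- first '/', sep nonempty ↔ '/' occurs in k — exact for this use.
def pvPrefixes (metrics : List (String × Int)) : PySem.Set (List Char) :=
  metrics.foldl
    (fun s kv =>
      let head := kv.1.toList.takeWhile (fun c => c ≠ '/')
      if '/' ∈ kv.1.toList then PySem.Set.add s head else s)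
    PySem.Set.empty

def infer_metric_type_py_alt (metrics : List (String × Int)) : String :=
  let prefixes := pvPrefixes metrics
  if PySem.Set.contains prefixes "coco".toList then "coco"
  else if PySem.Set.contains prefixes "lvis".toList then "lvis"
  else if PySem.Set.contains prefixes "crowd_human".toList then "crowdhuman"
  else "unknown"

-- ===== PRECONDITION & SPEC =====
def Spec_infer_metric_type_py (metrics : List (String × Int)) (out : String) : Prop := out = infer_metric_type_py_alt metrics
instance (metrics : List (String × Int)) (out : String) : Decidable (Spec_infer_metric_type_py metrics out) := by unfold Spec_infer_metric_type_py; infer_instance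

-- ===== CLAIM (what is proved, stated in full; the proofs are below) =====
def Claim_equal_infer_metric_type_py : Prop := ∀ (metrics : List (String × Int)), Dom_infer_metric_type_py metrics → Spec_infer_metric_type_py metrics (infer_metric_type_py metrics)

-- ===== LEMMAS AND PROOFS =====

-- a key with a '/' is its head, a '/', and a tail
lemma pv_ex_rest (k : List Char) (h : '/' ∈ k) :
    ∃ rest, k = k.takeWhile (fun c => c ≠ '/') ++ '/' :: rest := by
  induction k with
  | nil => cases h
  | cons c t ih =>
    by_cases hc : c = '/'
    · subst hc; exact ⟨t, by simp [List.takeWhile]⟩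
    · have ht : '/' ∈ t := by
        cases h with
        | head => exact absurd rfl hc
        | tail _ h => exact h
      obtain ⟨rest, hr⟩ := ih ht
      exact ⟨rest, by simpa [List.takeWhile, hc] using congrArg (c :: ·) hr⟩

lemma pv_take_append (p rest : List Char) (hp : '/' ∉ p) :
    (p ++ '/' :: rest).takeWhile (fun c => c ≠ '/') = p := by
  induction p with
  | nil => simp
  | cons c t ih =>
    have hc : c ≠ '/' := fun h => hp (h ▸ List.mem_cons_self)
    have ht : '/' ∉ t := fun h => hp (List.mem_cons_of_mem _ h)
    have hcb : decide (c ≠ '/') = true := by simp [hc]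
    rw [List.cons_append, List.takeWhile_cons, hcb, if_pos rfl, ih ht]

-- a key contributes prefix p (with '/' ∉ p) exactly when it starts with p ++ "/"
lemma pv_key_iff (k p : List Char) (hp : '/' ∉ p) :
    ('/' ∈ k ∧ k.takeWhile (fun c => c ≠ '/') = p) ↔
      PySem.Chars.startswith k (p ++ ['/']) = true := by
  rw [PySem.Chars.startswith_iff]
  constructor
  · rintro ⟨hk, hh⟩
    obtain ⟨rest, hr⟩ := pv_ex_rest k hk
    exact ⟨rest, by rw [hr, hh]; simp⟩
  · rintro ⟨rest, hr⟩
    refine ⟨?_, ?_⟩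
    · rw [← hr]; simp
    · rw [← hr, List.append_assoc]; exact pv_take_append p rest hp

lemma pv_contains_fold (metrics : List (String × Int)) (s : PySem.Set (List Char))
    (p : List Char) (hp : '/' ∉ p) :
    PySem.Set.contains (metrics.foldl
      (fun s kv =>
        let head := kv.1.toList.takeWhile (fun c => c ≠ '/')
        if '/' ∈ kv.1.toList then PySem.Set.add s head else s) s) p
    = (PySem.Set.contains s p
       || metrics.any (fun kv => PySem.Chars.startswith kv.1.toList (p ++ ['/']))) := by
  induction metrics generalizing s with
  | nil => simp
  | cons kv t ih =>
    rw [List.foldl_cons, List.any_cons, ih]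
    dsimp only
    by_cases hs : '/' ∈ kv.1.toList
    · rw [if_pos hs]
      have hmem : PySem.Set.contains (PySem.Set.add s (kv.1.toList.takeWhile (fun c => c ≠ '/'))) p
          = (PySem.Set.contains s p || decide (kv.1.toList.takeWhile (fun c => c ≠ '/') = p)) := by
        apply Bool.eq_iff_iff.mpr
        simp only [PySem.Set.contains, List.contains_iff_mem, Bool.or_eq_true, decide_eq_true_eq]
        rw [PySem.Set.mem_add]
        exact or_congr_right ⟨Eq.symm, Eq.symm⟩
      have hsw : decide (kv.1.toList.takeWhile (fun c => c ≠ '/') = p)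
          = PySem.Chars.startswith kv.1.toList (p ++ ['/']) := by
        apply Bool.eq_iff_iff.mpr
        simp only [decide_eq_true_eq]
        exact ⟨fun he => (pv_key_iff _ p hp).1 ⟨hs, he⟩,
               fun hb => ((pv_key_iff _ p hp).2 hb).2⟩
      rw [hmem, hsw, Bool.or_assoc]
    · rw [if_neg hs]
      have hns : PySem.Chars.startswith kv.1.toList (p ++ ['/']) = false := by
        cases hb : PySem.Chars.startswith kv.1.toList (p ++ ['/']) with
        | false => rfl
        | true => exact absurd ((pv_key_iff kv.1.toList p hp).2 hb).1 hs
      rw [hns, Bool.false_or]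

lemma pv_contains_pre (metrics : List (String × Int)) (p : List Char) (hp : '/' ∉ p) :
    PySem.Set.contains (pvPrefixes metrics) p
    = metrics.any (fun kv => PySem.Chars.startswith kv.1.toList (p ++ ['/'])) := by
  rw [pvPrefixes, pv_contains_fold metrics PySem.Set.empty p hp]
  simp [PySem.Set.contains, PySem.Set.empty]

-- ===== VERDICT (by name: the statement is the Claim_ definition above) =====
theorem infer_metric_type_py_spec : Claim_equal_infer_metric_type_py := by
  intro metrics _
  show infer_metric_type_py metrics = infer_metric_type_py_alt metrics
  unfold infer_metric_type_py infer_metric_type_py_alt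
  dsimp only
  rw [pv_contains_pre metrics "coco".toList (by decide),
      pv_contains_pre metrics "lvis".toList (by decide),
      pv_contains_pre metrics "crowd_human".toList (by decide)]
  have h1 : ∀ kv : String × Int, PySem.Str.startswith kv.1 "coco/" =
      PySem.Chars.startswith kv.1.toList ("coco".toList ++ ['/']) := by
    intro kv; rw [PySem.Str.startswith_eq]; rfl
  have h2 : ∀ kv : String × Int, PySem.Str.startswith kv.1 "lvis/" =
      PySem.Chars.startswith kv.1.toList ("lvis".toList ++ ['/']) := by
    intro kv; rw [PySem.Str.startswith_eq]; rfl
  have h3 : ∀ kv : String × Int, PySem.Str.startswith kv.1 "crowd_human/" =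
      PySem.Chars.startswith kv.1.toList ("crowd_human".toList ++ ['/']) := by
    intro kv; rw [PySem.Str.startswith_eq]; rfl
  simp only [h1, h2, h3]
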